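-- pv_equiv track=rewrite | github.com/DeadOnGames/texasholdem-gym-env | gym_examples/envs/HUNLTH_env.py | check_duplicates_score
-- ===== SOURCE A (Python) =====
-- from collections import Counter
--
-- def check_duplicates_score(pips_array):
--   a = dict(Counter(pips_array)) #E.g. {'2': 2, '12': 2, '13': 1}
--   b = dict()
--   for x, y in a.items():
--     if(int(y) >= 2):
--       b[x] = y
--   if(len(b) > 0):
--     sum = 0
--     for x, y in b.items():
--       sum += (int(x) * int(y))
--     return sum
--   else:
--     return 0
-- ===== SOURCE B (Python) =====
-- def check_duplicates_score(pips_array):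
--   return sum(int(x) for x in pips_array if pips_array.count(x) >= 2)
-- ===== Notes on version B (the rewrite author's own statement) =====
-- stated objective: simpler
-- what changed: B drops the Counter and both dict loops entirely and sums int(x) directly over every occurrence whose value is duplicated (sum over x in the list with count(x) >= 2), which gives the same total because summing int(x)*count(x) over distinct duplicated values equals summing int(x) over all their occurrences.
import Mathlib
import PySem

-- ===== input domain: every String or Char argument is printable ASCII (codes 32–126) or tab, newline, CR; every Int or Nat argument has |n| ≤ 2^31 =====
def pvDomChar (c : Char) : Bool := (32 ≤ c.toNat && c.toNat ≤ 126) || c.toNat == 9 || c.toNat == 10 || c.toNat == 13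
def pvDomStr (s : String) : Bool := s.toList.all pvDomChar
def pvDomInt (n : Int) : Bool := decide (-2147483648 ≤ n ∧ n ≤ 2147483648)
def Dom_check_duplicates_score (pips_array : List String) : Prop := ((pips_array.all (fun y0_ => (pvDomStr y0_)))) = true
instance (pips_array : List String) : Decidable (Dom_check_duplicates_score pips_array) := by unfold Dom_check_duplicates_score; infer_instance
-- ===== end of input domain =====

-- B replaces A's Counter-plus-two-dict-loops with a single comprehension summing int(x)
-- over every occurrence whose value appears at least twice (simpler, not faster).


-- ===== PORT A =====
-- a = dict(Counter(pips_array)); then filter counts >= 2 into b; then sum int(x)*int(y).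
-- int(x) is ported as (PySem.Int.ofStr? x).getD 0: Python raises ValueError on a
-- non-int-like key there, and Pre_ excludes exactly those inputs. int(y) on the int
-- count y is the identity.
def check_duplicates_score (pips_array : List String) : Int :=
  let a : PySem.Dict String Int := PySem.Dict.counter pips_array
  let b : PySem.Dict String Int :=
    a.items.foldl (fun bd p => if 2 ≤ p.2 then bd.insert p.1 p.2 else bd) PySem.Dict.empty
  if b.items.length > 0 then
    b.items.foldl (fun s p => s + (PySem.Int.ofStr? p.1).getD 0 * p.2) 0
  else 0

-- ===== PORT B =====
-- sum(int(x) for x in pips_array if pips_array.count(x) >= 2); int(x) as above.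
def check_duplicates_score_alt (pips_array : List String) : Int :=
  ((pips_array.filter (fun x => 2 ≤ pips_array.count x)).map
      (fun x => (PySem.Int.ofStr? x).getD 0)).sum

-- ===== PRECONDITION & SPEC =====
-- Pre_ excludes exactly the inputs on which the Python A raises ValueError: some element
-- occurring at least twice is not int-parseable (both A's and B's Python raise there).
def Pre_check_duplicates_score (pips_array : List String) : Prop :=
  ∀ x ∈ pips_array, 2 ≤ pips_array.count x → (PySem.Int.ofStr? x).isSome
instance (pips_array : List String) : Decidable (Pre_check_duplicates_score pips_array) := by unfold Pre_check_duplicates_score; infer_instance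
def pvWitness_check_duplicates_score : List String := ["2", "2", "12", "12", "13"]

def Spec_check_duplicates_score (pips_array : List String) (out : Int) : Prop := out = check_duplicates_score_alt pips_array
instance (pips_array : List String) (out : Int) : Decidable (Spec_check_duplicates_score pips_array out) := by unfold Spec_check_duplicates_score; infer_instance

-- ===== CLAIM (what is proved, stated in full; the proofs are below) =====
def Claim_equal_check_duplicates_score : Prop := ∀ (pips_array : List String), Dom_check_duplicates_score pips_array → Pre_check_duplicates_score pips_array → Spec_check_duplicates_score pips_array (check_duplicates_score pips_array)

-- ===== LEMMAS AND PROOFS =====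

-- summing f over a filtered list = summing (if p then f else 0) over the whole list
lemma sum_filter_map_eq {α : Type} (l : List α) (p : α → Bool) (f : α → Int) :
    ((l.filter p).map f).sum = (l.map (fun x => if p x then f x else 0)).sum := by
  induction l with
  | nil => rfl
  | cons x xs ih =>
    by_cases h : p x <;> simp [h, ih]

-- counting in a flatMap of replicates over a Nodup list
lemma count_flatMap_replicate {α : Type} [DecidableEq α] (S : List α) (c : α → Nat)
    (hS : S.Nodup) (a : α) :
    (S.flatMap fun k => List.replicate (c k) k).count a = if a ∈ S then c a else 0 := by
  induction S with
  | nil => simp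
  | cons k S ih =>
    rcases List.nodup_cons.mp hS with ⟨hk, hS'⟩
    by_cases hak : a = k
    · subst hak
      simp [List.flatMap_cons, List.count_append, ih hS', hk]
    · have hka : ¬ k = a := fun h => hak h.symm
      simp [List.flatMap_cons, List.count_append, ih hS', hak,
        List.count_replicate, hka]

-- a list is a permutation of its distinct elements each replicated by its count
lemma perm_flatMap_replicate_count (l : List String) :
    l.Perm ((PySem.Set.ofList l).flatMap fun k => List.replicate (l.count k) k) := by
  refine List.perm_iff_count.mpr fun a => ?_
  rw [count_flatMap_replicate _ _ (PySem.Set.nodup_ofList l) a]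
  by_cases ha : a ∈ l
  · simp [PySem.Set.mem_ofList, ha]
  · simp [PySem.Set.mem_ofList, ha, List.count_eq_zero.mpr ha]

lemma sum_flatMap_int {α : Type} (S : List α) (g : α → List Int) :
    (S.flatMap g).sum = (S.map fun k => (g k).sum).sum := by
  induction S with
  | nil => rfl
  | cons k S ih => simp [List.flatMap_cons, ih]

-- fold a per-occurrence sum into a per-distinct-value sum weighted by the count
lemma sum_map_eq_sum_set (l : List String) (g : String → Int) :
    (l.map g).sum
      = ((PySem.Set.ofList l).map fun k => (l.count k : Int) * g k).sum := by
  rw [((perm_flatMap_replicate_count l).map g).sum_eq, List.map_flatMap, sum_flatMap_int]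
  simp [List.map_replicate]

-- the filter-into-a-dict loop of A keeps exactly the filtered items, in order
lemma items_filter_loop (pairs : List (String × Int))
    (hnd : (pairs.map Prod.fst).Nodup) :
    (pairs.foldl (fun bd p => if 2 ≤ p.2 then bd.insert p.1 p.2 else bd)
        (PySem.Dict.empty : PySem.Dict String Int)).items
      = pairs.filter (fun p => decide (2 ≤ p.2)) := by
  have hfun : (fun (bd : PySem.Dict String Int) (p : String × Int) =>
        if 2 ≤ p.2 then bd.insert p.1 p.2 else bd)
      = fun bd p => if (fun q : String × Int => decide (2 ≤ q.2)) p
          then bd.insert p.1 p.2 else bd := by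
    funext bd p; by_cases h : 2 ≤ p.2 <;> simp [h]
  rw [hfun, ← List.foldl_filter]
  have hsub : (pairs.filter (fun q : String × Int => decide (2 ≤ q.2))).map Prod.fst
      |>.Sublist (pairs.map Prod.fst) :=
    List.Sublist.map Prod.fst List.filter_sublist
  rw [PySem.Dict.items_foldl_insert_fresh
      (l := pairs.filter (fun q : String × Int => decide (2 ≤ q.2)))
      (k := Prod.fst) (v := Prod.snd) (d := PySem.Dict.empty)
      (by intro a _; simp [PySem.Dict.contains_empty]) (hnd.sublist hsub)]
  simp [PySem.Dict.empty]

-- A's value, characterised over the distinct elements of the input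
lemma check_duplicates_score_eq (l : List String) :
    check_duplicates_score l
      = (((PySem.Set.ofList l).filter (fun k => decide (2 ≤ (l.count k : Int)))).map
          (fun k => (PySem.Int.ofStr? k).getD 0 * (l.count k : Int))).sum := by
  simp only [check_duplicates_score]
  have hnd : (((PySem.Set.ofList l).map
      (fun k => (k, (l.count k : Int)))).map Prod.fst).Nodup := by
    rw [List.map_map]
    have hid : (Prod.fst ∘ fun k : String => (k, (l.count k : Int))) = id := by
      funext k; rfl
    rw [hid, List.map_id]
    exact PySem.Set.nodup_ofList l
  rw [PySem.Dict.items_counter, items_filter_loop _ hnd, List.filter_map]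
  have hcomp : ((fun q : String × Int => decide (2 ≤ q.2)) ∘
      fun k : String => (k, (l.count k : Int)))
      = fun k => decide (2 ≤ (l.count k : Int)) := rfl
  rw [hcomp]
  cases hF : (PySem.Set.ofList l).filter (fun k => decide (2 ≤ (l.count k : Int))) with
  | nil => simp
  | cons k0 F' =>
    rw [if_pos (by simp), PySem.List.foldl_add]
    rw [← hF, List.map_map, zero_add]
    rfl

-- ===== VERDICT (by name: the statement is the Claim_ definition above) =====
theorem check_duplicates_score_spec : Claim_equal_check_duplicates_score := by
  intro l _ _
  unfold Spec_check_duplicates_score check_duplicates_score_alt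
  rw [check_duplicates_score_eq l,
      sum_filter_map_eq l _ (fun x => (PySem.Int.ofStr? x).getD 0),
      sum_map_eq_sum_set l _,
      sum_filter_map_eq (PySem.Set.ofList l) _
        (fun k => (PySem.Int.ofStr? k).getD 0 * (l.count k : Int))]
  refine congrArg List.sum (List.map_congr_left fun k _ => ?_)
  by_cases h : 2 ≤ l.count k
  · have h' : (2:Int) ≤ (l.count k : Int) := by exact_mod_cast h
    simp [h, h', mul_comm]
  · have h' : ¬ (2:Int) ≤ (l.count k : Int) := by exact_mod_cast h
    simp [h, h']
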